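-- pv_equiv track=rewrite | github.com/xCenny/Whusdata | main.py | validate_turn_order
-- ===== SOURCE A (Python) =====
-- def validate_turn_order(conversation_history: list) -> bool:
--     """Validates strict user → assistant → user → assistant alternation."""
--     if not conversation_history or len(conversation_history) < 2:
--         return False
--     expected_role = "user"
--     for msg in conversation_history:
--         if msg.get("role") != expected_role:
--             return False
--         expected_role = "assistant" if expected_role == "user" else "user"
--     return True
-- ===== SOURCE B (Python) =====
-- def validate_turn_order(conversation_history: list) -> bool:
--     """Validates strict user -> assistant -> user -> assistant alternation."""
--     if len(conversation_history) < 2: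
--         return False
--     if conversation_history[0].get("role") != "user":
--         return False
--     return all(
--         b.get("role") != a.get("role") and b.get("role") in ("user", "assistant")
--         for a, b in zip(conversation_history, conversation_history[1:])
--     )
-- ===== Notes on version B (the rewrite author's own statement) =====
-- stated objective: alternative
-- what changed: B replaces A's toggling expected-role state machine with a stateless check: first role must be 'user', then every adjacent pair (via zip) must have differing roles with the successor in {'user','assistant'}.
import Mathlib
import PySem

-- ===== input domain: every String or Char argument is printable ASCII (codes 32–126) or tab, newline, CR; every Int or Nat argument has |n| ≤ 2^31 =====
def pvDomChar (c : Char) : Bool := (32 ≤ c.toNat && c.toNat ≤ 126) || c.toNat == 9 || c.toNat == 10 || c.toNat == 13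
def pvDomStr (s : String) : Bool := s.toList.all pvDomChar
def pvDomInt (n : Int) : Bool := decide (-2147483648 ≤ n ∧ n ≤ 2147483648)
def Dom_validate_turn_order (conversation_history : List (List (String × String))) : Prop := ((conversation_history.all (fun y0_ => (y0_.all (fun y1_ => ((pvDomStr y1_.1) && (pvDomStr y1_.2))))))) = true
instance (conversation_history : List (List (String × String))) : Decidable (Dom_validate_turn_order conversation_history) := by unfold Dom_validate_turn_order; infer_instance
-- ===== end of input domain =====

-- B: compares adjacent neighbours (zip) after a first-element guard, instead of A's toggling expected-role flag.
-- ===== PORT A =====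
-- msg.get("role") for both ports (the dict primitive, shared)
def pvGetRole (m : List (String × String)) : Option String :=
  (PySem.Dict.mk m).get? "role"

-- A's for-loop with the toggling expected_role accumulator
def pvGoA : List (List (String × String)) → String → Bool
  | [], _ => true
  | msg :: rest, expected =>
    if pvGetRole msg ≠ some expected then false
    else pvGoA rest (if expected == "user" then "assistant" else "user")

def validate_turn_order (conversation_history : List (List (String × String))) : Bool :=
  if conversation_history.isEmpty || conversation_history.length < 2 then false
  else pvGoA conversation_history "user"

-- ===== PORT B =====
-- the per-pair check of B's all(...) generator
def pvPairOk (a b : List (String × String)) : Bool :=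
  (pvGetRole b != pvGetRole a) &&
    (pvGetRole b == some "user" || pvGetRole b == some "assistant")

def validate_turn_order_alt (conversation_history : List (List (String × String))) : Bool :=
  if conversation_history.length < 2 then false
  else
    match conversation_history with
    | [] => false
    | first :: _ =>
      if pvGetRole first ≠ some "user" then false
      else
        ((conversation_history.zip conversation_history.tail).all
          (fun p => pvPairOk p.1 p.2))

-- ===== PRECONDITION & SPEC =====
def Spec_validate_turn_order (conversation_history : List (List (String × String))) (out : Bool) : Prop := out = validate_turn_order_alt conversation_history
instance (conversation_history : List (List (String × String))) (out : Bool) : Decidable (Spec_validate_turn_order conversation_history out) := by unfold Spec_validate_turn_order; infer_instance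

-- ===== CLAIM (what is proved, stated in full; the proofs are below) =====
def Claim_equal_validate_turn_order : Prop := ∀ (conversation_history : List (List (String × String))), Dom_validate_turn_order conversation_history → Spec_validate_turn_order conversation_history (validate_turn_order conversation_history)

-- ===== LEMMAS AND PROOFS =====

-- Boolean facts on a present role r: "r == expected's flip" is exactly B's pair test
-- "r differs from expected and r is one of user/assistant"
theorem pvPairBeq_user (r : String) :
    ((some r : Option String) == some "assistant") =
      (((some r : Option String) != some "user") &&
        (((some r : Option String) == some "user") || ((some r : Option String) == some "assistant"))) := by
  simp only [Option.some_beq_some, bne]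
  cases e1 : r == "user" <;> cases e2 : r == "assistant"
  · rfl
  · rfl
  · rfl
  · exfalso
    have h := (eq_of_beq e1).symm.trans (eq_of_beq e2)
    simp at h

theorem pvPairBeq_assistant (r : String) :
    ((some r : Option String) == some "user") =
      (((some r : Option String) != some "assistant") &&
        (((some r : Option String) == some "user") || ((some r : Option String) == some "assistant"))) := by
  simp only [Option.some_beq_some, bne]
  cases e1 : r == "user" <;> cases e2 : r == "assistant"
  · rfl
  · rfl
  · rfl
  · exfalso
    have h := (eq_of_beq e1).symm.trans (eq_of_beq e2)
    simp at h

-- key invariant: for expected ∈ {"user","assistant"}, A's flag loop on a nonempty list equals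
-- "head has the expected role" plus B's adjacent-pair scan
theorem pvGoA_eq_pairs (l : List (List (String × String))) (a : List (String × String))
    (expected : String) (hexp : expected = "user" ∨ expected = "assistant") :
    pvGoA (a :: l) expected =
      ((pvGetRole a == some expected) &&
        (((a :: l).zip l).all (fun p => pvPairOk p.1 p.2))) := by
  induction l generalizing a expected with
  | nil => simp [pvGoA, Bool.beq_eq_decide_eq]
  | cons b t ih =>
    have flip : (if expected == "user" then "assistant" else "user") = "user" ∨
        (if expected == "user" then "assistant" else "user") = "assistant" := by
      rcases hexp with h | h <;> subst h <;> simp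
    rw [pvGoA]
    by_cases ha : pvGetRole a = some expected
    · rw [if_neg (by simp [ha]), ih b _ flip]
      have hb : (pvGetRole b == some (if expected == "user" then "assistant" else "user")) =
          pvPairOk a b := by
        rcases hexp with h | h <;> subst h <;>
          simp only [pvPairOk, ha] <;>
          rcases hr : pvGetRole b with _ | r
        · rfl
        · exact pvPairBeq_user r
        · rfl
        · exact pvPairBeq_assistant r
      rw [hb]
      simp [ha, List.zip, List.all_cons]
    · rw [if_pos (by simp [ha])]
      simp [ha]

-- ===== VERDICT (by name: the statement is the Claim_ definition above) =====
theorem validate_turn_order_spec : Claim_equal_validate_turn_order := by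
  intro h _
  unfold Spec_validate_turn_order validate_turn_order validate_turn_order_alt
  match h with
  | [] => simp
  | [a] => simp
  | a :: b :: t =>
    simp only [List.isEmpty, List.length, List.tail]
    rw [pvGoA_eq_pairs _ _ _ (Or.inl rfl)]
    by_cases ha : pvGetRole a = some "user" <;> simp [ha]
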